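-- pv_equiv track=rewrite | github.com/lyx-edu/S-AES | 3_S-AES_ascii.py | text_to_binary
-- ===== SOURCE A (Python) =====
-- def text_to_binary(text):
--     # 将文本转换为16位整数列表（每2个字符为1块）
--     binary_data = []
--     for i in range(0, len(text), 2):
--         block = text[i:i+2]
--         # 如果不足2个字符则填充
--         if len(block) == 1:
--             block += '\0'
--         binary_data.append((ord(block[0]) << 8) + ord(block[1]))
--     return binary_data
-- ===== SOURCE B (Python) =====
-- def text_to_binary(text):
--     # Consume the characters two at a time from a single iterator;
--     # next(it, '\0') supplies the padding byte when the length is odd.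
--     it = iter(text)
--     return [(ord(h) << 8) + ord(next(it, '\0')) for h in it]
-- ===== Notes on version B (the rewrite author's own statement) =====
-- stated objective: faster
-- what changed: B pairs characters by consuming one iterator two at a time in a single comprehension (next(it,'\0') pads the odd tail), replacing A's index loop over range(0,len,2) with per-block slicing and an explicit pad check.
import Mathlib
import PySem

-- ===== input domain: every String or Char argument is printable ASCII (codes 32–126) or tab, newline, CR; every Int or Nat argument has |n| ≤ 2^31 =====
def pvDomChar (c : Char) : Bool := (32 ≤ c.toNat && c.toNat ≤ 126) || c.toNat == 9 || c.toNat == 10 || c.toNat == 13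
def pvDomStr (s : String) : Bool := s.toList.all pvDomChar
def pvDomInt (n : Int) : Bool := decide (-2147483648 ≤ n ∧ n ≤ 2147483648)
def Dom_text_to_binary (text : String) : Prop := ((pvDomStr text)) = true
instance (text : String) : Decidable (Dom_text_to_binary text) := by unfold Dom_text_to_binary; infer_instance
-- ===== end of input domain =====

-- B changes the decomposition: it consumes the characters two at a time (padding the
-- final odd character directly), instead of A's index loop with slicing and a pad check.

-- ===== PORT A =====
-- A's loop body: slice out text[i:i+2], pad to 2 chars if needed, append the 16-bit value.
-- block always has ≥ 2 chars after padding (every i in the range is < len), so the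
-- fallback 0 of the match is unreachable.
def pvStepA (cs : List Char) (acc : List Int) (i : Int) : List Int :=
  let block := PySem.List.slice cs (some i) (some (i + 2))
  let block := if block.length = 1 then block ++ ['\x00'] else block
  acc ++ [match block with
          | b0 :: b1 :: _ => ((b0.toNat : Int) <<< 8) + (b1.toNat : Int)
          | _ => 0]

def text_to_binary (text : String) : List Int :=
  let cs := text.toList
  (PySem.List.pyRange 0 (cs.length : Int) 2).foldl (pvStepA cs) []

-- ===== PORT B =====
-- Source B's comprehension: each step takes the head h and the next char (or '\x00') from
-- the same stream — a direct two-at-a-time recursion on the character list.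
def pvPairs : List Char → List Int
  | [] => []
  | [h] => [((h.toNat : Int) <<< 8) + (('\x00'.toNat : Int))]
  | h :: l :: rest => (((h.toNat : Int) <<< 8) + (l.toNat : Int)) :: pvPairs rest

def text_to_binary_alt (text : String) : List Int := pvPairs text.toList

-- ===== PRECONDITION & SPEC =====
def Spec_text_to_binary (text : String) (out : List Int) : Prop := out = text_to_binary_alt text
instance (text : String) (out : List Int) : Decidable (Spec_text_to_binary text out) := by unfold Spec_text_to_binary; infer_instance

-- ===== CLAIM (what is proved, stated in full; the proofs are below) =====
def Claim_equal_text_to_binary : Prop := ∀ (text : String), Dom_text_to_binary text → Spec_text_to_binary text (text_to_binary text)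

-- ===== LEMMAS AND PROOFS =====

-- range(a, b, 2) peels its first index when a < b
theorem pvPyRange_two_cons (a b : Int) (h : a < b) :
    PySem.List.pyRange a b 2 = a :: PySem.List.pyRange (a + 2) b 2 := by
  rw [PySem.List.pyRange_of_pos a b (by norm_num),
      PySem.List.pyRange_of_pos (a + 2) b (by norm_num)]
  have hcount : (if a < b then ((b - a + 2 - 1) / 2).toNat else 0)
      = (if a + 2 < b then ((b - (a + 2) + 2 - 1) / 2).toNat else 0) + 1 := by
    split_ifs <;> omega
  rw [hcount, List.range_succ_eq_map]
  simp only [List.map_cons, List.map_map]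
  refine congrArg₂ List.cons (by norm_num) ?_
  apply List.map_congr_left
  intro k _
  simp only [Function.comp_apply]
  push_cast
  ring

-- the fold over range(j, len, 2) produces the two-at-a-time pairing of the suffix
theorem pvLoopA (full : List Char) (j : Nat) (acc : List Int) :
    (PySem.List.pyRange (j : Int) (full.length : Int) 2).foldl (pvStepA full) acc
      = acc ++ pvPairs (full.drop j) := by
  by_cases hj : full.length ≤ j
  · have hnil : PySem.List.pyRange (j : Int) (full.length : Int) 2 = [] := by
      rw [PySem.List.pyRange_of_pos _ _ (by norm_num)]
      have : ¬ ((j : Int) < (full.length : Int)) := by exact_mod_cast not_lt.mpr hj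
      simp [this]
    rw [hnil, List.drop_eq_nil_of_le hj]
    simp [pvPairs]
  · rw [not_le] at hj
    rw [pvPyRange_two_cons _ _ (by exact_mod_cast hj), List.foldl_cons]
    have hstep : pvStepA full acc (j : Int)
        = acc ++ [match (full.drop j).take 2 with
            | b0 :: b1 :: _ => ((b0.toNat : Int) <<< 8) + (b1.toNat : Int)
            | [b0] => ((b0.toNat : Int) <<< 8) + (('\x00'.toNat : Int))
            | _ => 0] := by
      unfold pvStepA
      have h2 : ((j : Int) + 2) = ((j : Int) + ((2 : Nat) : Int)) := by push_cast; ring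
      rw [h2, PySem.List.slice_natCast_add]
      rcases hd : full.drop j with _ | ⟨b0, _ | ⟨b1, rest⟩⟩
      · exact absurd (List.drop_eq_nil_iff.mp hd) (by omega)
      · simp [List.take]
      · simp [List.take]
    have hrest : ((j : Int) + 2) = (((j + 2 : Nat)) : Int) := by push_cast; ring
    rw [hstep, hrest, pvLoopA full (j + 2) _]
    rcases hd : full.drop j with _ | ⟨b0, _ | ⟨b1, rest⟩⟩
    · exact absurd (List.drop_eq_nil_iff.mp hd) (by omega)
    · have : full.drop (j + 2) = [] := by
        have := congrArg List.length hd
        simp at this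
        exact List.drop_eq_nil_of_le (by omega)
      simp [this, pvPairs]
    · have h2 : full.drop (j + 2) = rest := by
        rw [← List.drop_drop, hd]
        rfl
      simp [h2, pvPairs]
termination_by full.length - j
decreasing_by omega

-- ===== VERDICT (by name: the statement is the Claim_ definition above) =====
theorem text_to_binary_spec : Claim_equal_text_to_binary := by
  intro text _
  unfold Spec_text_to_binary text_to_binary text_to_binary_alt
  have := pvLoopA text.toList 0 []
  simpa using this
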